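-- pv_equiv track=rewrite | github.com/rohitjain994/rhyme_words | rhyme.py | get_rhyme
-- ===== SOURCE A (Python) =====
-- word_list = ["Computing","Polluting","Diluting","Commuting","Recruiting","Drooping"]
--
-- def get_character_match(word1,word2):
--   n = len(word1)
--   m = len(word2)
--   i = 1
--   while(word1[n-i]==word2[m-i]):
--     i = i+1
--   return i-1
--
-- def get_rhyme(matching_word):
--     match_word = {}
--     for word in word_list:
--         cnt = get_character_match(matching_word,word)
--         if cnt != 0:
--             if cnt not in match_word:
--                 match_word[cnt] = [word]
--             else:
--                 match_word[cnt].append(word)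
--     if match_word:
--         k=list(match_word)
--         k.sort(reverse = True)
--         return match_word[k[0]]
--     else:
--         return None
-- ===== SOURCE B (Python) =====
-- word_list = ["Computing","Polluting","Diluting","Commuting","Recruiting","Drooping"]
--
-- def get_character_match(word1,word2):
--   n = len(word1)
--   m = len(word2)
--   i = 1
--   while(word1[n-i]==word2[m-i]):
--     i = i+1
--   return i-1
--
-- def get_rhyme(matching_word):
--     best_len = 0
--     best = []
--     for word in word_list:
--         cnt = get_character_match(matching_word, word)
--         if cnt > best_len:
--             best_len = cnt
--             best = [word]
--         elif cnt == best_len and cnt != 0: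
--             best.append(word)
--     return best if best_len != 0 else None
-- ===== Notes on version B (the rewrite author's own statement) =====
-- stated objective: simpler
-- what changed: get_rhyme's cnt-keyed dict of buckets plus descending key sort is replaced by a single pass keeping a running best_len/best-bucket accumulator (get_character_match kept verbatim).
import Mathlib
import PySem

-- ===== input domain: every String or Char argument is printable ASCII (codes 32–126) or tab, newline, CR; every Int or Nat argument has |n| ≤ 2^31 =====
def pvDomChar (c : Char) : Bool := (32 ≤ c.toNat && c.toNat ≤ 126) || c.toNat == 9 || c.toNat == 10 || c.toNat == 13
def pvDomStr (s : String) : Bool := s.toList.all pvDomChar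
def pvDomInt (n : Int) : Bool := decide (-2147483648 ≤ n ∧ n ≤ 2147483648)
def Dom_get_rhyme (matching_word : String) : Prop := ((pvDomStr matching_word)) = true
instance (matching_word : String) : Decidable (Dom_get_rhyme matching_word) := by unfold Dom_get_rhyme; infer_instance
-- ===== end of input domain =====

-- B replaces A's cnt-keyed dict plus descending key sort by a single running-maximum pass
-- (best_len/best accumulator), keeping get_character_match verbatim; objective: simpler.

-- ===== PORT A =====
-- the module-level word_list (identical in both sources)
def pvWordList : List String :=
  ["Computing", "Polluting", "Diluting", "Commuting", "Recruiting", "Drooping"]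

-- helper get_character_match (textually identical in A and in B; shared):
-- while word1[n-i]==word2[m-i]: i += 1; return i-1.  none = IndexError.
def gcmLoop (w1 w2 : List Char) (i : Nat) : Option Int :=
  match h1 : PySem.List.pyGet? w1 ((w1.length : Int) - i),
        h2 : PySem.List.pyGet? w2 ((w2.length : Int) - i) with
  | some c1, some c2 =>
      if c1 = c2 then gcmLoop w1 w2 (i + 1) else some ((i : Int) - 1)
  | _, _ => none
termination_by 2 * w1.length + 1 - i
decreasing_by
  have hne : PySem.List.pyGet? w1 ((w1.length : Int) - i) ≠ none := by simp [h1]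
  rw [ne_eq, PySem.List.pyGet?_eq_none_iff, not_not] at hne
  obtain ⟨hl, -⟩ := hne
  omega

def get_character_match (word1 word2 : String) : Option Int :=
  gcmLoop word1.toList word2.toList 1

def get_rhyme (matching_word : String) : Option (List String) :=
  match pvWordList.foldl (fun acc word =>
      match acc with
      | none => none
      | some d =>
        match get_character_match matching_word word with
        | none => none
        | some cnt =>
          if cnt ≠ 0 then
            if d.contains cnt = false then some (d.insert cnt [word])
            else some (d.modify cnt [] (fun l => l ++ [word]))
          else some d)
      (some (PySem.Dict.empty : PySem.Dict Int (List String))) with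
  | none => none
  | some d =>
    if d.items ≠ [] then
      match PySem.List.pyGet? (PySem.List.sorted d.keys (fun k => k) true) 0 with
      | some k0 => d.get? k0
      | none => none
    else none

-- ===== PORT B =====
def get_rhyme_alt (matching_word : String) : Option (List String) :=
  match pvWordList.foldl (fun acc word =>
      match acc with
      | none => none
      | some st =>
        match get_character_match matching_word word with
        | none => none
        | some cnt =>
          some (if st.1 < cnt then (cnt, [word])
                else if cnt = st.1 ∧ cnt ≠ 0 then (st.1, st.2 ++ [word])
                else (st.1, st.2)))
      (some ((0 : Int), ([] : List String))) with
  | none => none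
  | some st => if st.1 ≠ 0 then some st.2 else none

-- ===== PRECONDITION & SPEC =====
-- A raises IndexError exactly when for some listed word the while loop in
-- get_character_match never finds a mismatch before running off both ends (e.g. the
-- empty string, or matching_word equal to a listed word); Pre_ excludes exactly those.
def Pre_get_rhyme (matching_word : String) : Prop :=
  ∀ w ∈ ["Computing", "Polluting", "Diluting", "Commuting", "Recruiting", "Drooping"],
    ∃ i ∈ Finset.Icc 1 (min (2 * matching_word.toList.length) (2 * w.toList.length)),
      PySem.List.pyGet? matching_word.toList ((matching_word.toList.length : Int) - i)
        ≠ PySem.List.pyGet? w.toList ((w.toList.length : Int) - i)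
instance (matching_word : String) : Decidable (Pre_get_rhyme matching_word) := by
  unfold Pre_get_rhyme; infer_instance

def pvWitness_get_rhyme : String := "ing"

def Spec_get_rhyme (matching_word : String) (out : Option (List String)) : Prop := out = get_rhyme_alt matching_word
instance (matching_word : String) (out : Option (List String)) : Decidable (Spec_get_rhyme matching_word out) := by unfold Spec_get_rhyme; infer_instance

-- ===== CLAIM (what is proved, stated in full; the proofs are below) =====
def Claim_equal_get_rhyme : Prop := ∀ (matching_word : String), Dom_get_rhyme matching_word → Pre_get_rhyme matching_word → Spec_get_rhyme matching_word (get_rhyme matching_word)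

-- ===== LEMMAS AND PROOFS =====

lemma gcmLoop_ge (w1 w2 : List Char) (i : Nat) :
    ∀ (c : Int), gcmLoop w1 w2 i = some c → (i : Int) - 1 ≤ c := by
  induction i using gcmLoop.induct (w1 := w1) (w2 := w2) with
  | case1 x c2 h2 h1 ih =>
    intro c h
    rw [gcmLoop, h1, h2] at h
    simp at h
    have := ih c h
    omega
  | case2 x c1 c2 h1 h2 hne =>
    intro c h
    rw [gcmLoop, h1, h2] at h
    simp [hne] at h
    omega
  | case3 x hno =>
    intro c h
    rw [gcmLoop] at h
    rcases e1 : PySem.List.pyGet? w1 ((w1.length : Int) - x) with _ | c1 <;>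
      rcases e2 : PySem.List.pyGet? w2 ((w2.length : Int) - x) with _ | c2 <;>
        simp at h

lemma gcmLoop_some (w1 w2 : List Char) (j : Nat) :
    1 ≤ j →
    (∃ i : Nat, j ≤ i ∧ i ≤ min (2 * w1.length) (2 * w2.length) ∧
      PySem.List.pyGet? w1 ((w1.length : Int) - i) ≠ PySem.List.pyGet? w2 ((w2.length : Int) - i)) →
    ∃ c, gcmLoop w1 w2 j = some c := by
  induction j using gcmLoop.induct (w1 := w1) (w2 := w2) with
  | case1 x c2 h2 h1 ih =>
    rintro hx ⟨i, hxi, hile, hne⟩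
    rw [gcmLoop, h1, h2]
    show ∃ c, (if c2 = c2 then gcmLoop w1 w2 (x + 1) else some ((x : Int) - 1)) = some c
    rw [if_pos rfl]
    apply ih (by omega)
    refine ⟨i, ?_, hile, hne⟩
    rcases Nat.eq_or_lt_of_le hxi with rfl | hlt
    · exact absurd (by rw [h1, h2]) hne
    · omega
  | case2 x c1 c2 h1 h2 hne =>
    intro _ _
    rw [gcmLoop, h1, h2]
    simp [hne]
  | case3 x hno =>
    rintro hx ⟨i, hxi, hile, hne⟩
    exfalso
    have hr1 : PySem.List.pyGet? w1 ((w1.length : Int) - x) ≠ none := by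
      rw [ne_eq, PySem.List.pyGet?_eq_none_iff, not_not]
      constructor <;> [omega; omega]
    have hr2 : PySem.List.pyGet? w2 ((w2.length : Int) - x) ≠ none := by
      rw [ne_eq, PySem.List.pyGet?_eq_none_iff, not_not]
      constructor <;> [omega; omega]
    rcases e1 : PySem.List.pyGet? w1 ((w1.length : Int) - x) with _ | c1
    · exact hr1 e1
    rcases e2 : PySem.List.pyGet? w2 ((w2.length : Int) - x) with _ | c2
    · exact hr2 e2
    exact hno c1 c2 e1 e2

def pvInv (d : PySem.Dict Int (List String)) (bl : Int) (best : List String) : Prop :=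
  d.keys.Nodup ∧ (∀ k ∈ d.keys, 0 < k ∧ k ≤ bl) ∧
    ((bl = 0 ∧ d.keys = []) ∨ (0 < bl ∧ bl ∈ d.keys)) ∧ best = d.getD bl []

lemma pvNodupAppendSingleton {α : Type} (l : List α) (x : α) (h : l.Nodup) (hx : x ∉ l) :
    (l ++ [x]).Nodup := by
  simp [List.nodup_append, h]
  exact fun a ha hax => hx (hax ▸ ha)

lemma loop_inv (mw : String) :
    ∀ (ws : List String) (d : PySem.Dict Int (List String)) (bl : Int) (best : List String),
    pvInv d bl best →
    (∀ w ∈ ws, ∃ c, get_character_match mw w = some c ∧ 0 ≤ c) →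
    ∃ d' bl' best',
      ws.foldl (fun acc word =>
        match acc with
        | none => none
        | some d =>
          match get_character_match mw word with
          | none => none
          | some cnt =>
            if cnt ≠ 0 then
              if d.contains cnt = false then some (d.insert cnt [word])
              else some (d.modify cnt [] (fun l => l ++ [word]))
            else some d) (some d) = some d'
      ∧ ws.foldl (fun acc word =>
        match acc with
        | none => none
        | some st =>
          match get_character_match mw word with
          | none => none
          | some cnt =>
            some (if st.1 < cnt then (cnt, [word])
                  else if cnt = st.1 ∧ cnt ≠ 0 then (st.1, st.2 ++ [word])
                  else (st.1, st.2))) (some (bl, best)) = some (bl', best')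
      ∧ pvInv d' bl' best' := by
  intro ws
  induction ws with
  | nil =>
    intro d bl best hinv _
    exact ⟨d, bl, best, rfl, rfl, hinv⟩
  | cons w rest ih =>
    intro d bl best hinv hall
    obtain ⟨c, hc, hc0⟩ := hall w (by simp)
    have hrest : ∀ w' ∈ rest, ∃ c, get_character_match mw w' = some c ∧ 0 ≤ c := by
      intro w' hw'; exact hall w' (by simp [hw'])
    obtain ⟨hnd, hbnd, hmax, hbest⟩ := hinv
    have hbl0 : 0 ≤ bl := by
      rcases hmax with ⟨h0, _⟩ | ⟨h0, _⟩ <;> omega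
    simp only [List.foldl_cons, hc]
    by_cases hcz : c = 0
    · subst hcz
      have eA : (if (0:Int) ≠ 0 then
            if d.contains 0 = false then some (d.insert 0 [w])
            else some (d.modify 0 [] (fun l => l ++ [w]))
          else some d) = some d := by simp
      have eB : (if bl < (0:Int) then ((0:Int), [w])
            else if (0:Int) = bl ∧ (0:Int) ≠ 0 then (bl, best ++ [w])
            else (bl, best)) = (bl, best) := by
        simp [not_lt.mpr hbl0]
      simp only [eA, eB]
      exact ih d bl best ⟨hnd, hbnd, hmax, hbest⟩ hrest
    · by_cases hlt : bl < c
      · have hcpos : 0 < c := lt_of_le_of_lt hbl0 hlt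
        have hnotmem : c ∉ d.keys := fun hk => absurd (hbnd c hk).2 (not_le.mpr hlt)
        have hcont : d.contains c = false := by
          rw [← Bool.not_eq_true, PySem.Dict.contains_iff_mem_keys]
          exact hnotmem
        have hkeys : (d.insert c [w]).keys = d.keys ++ [c] :=
          PySem.Dict.keys_insert_of_not_contains d [w] hcont
        have eA : (if c ≠ 0 then
              if d.contains c = false then some (d.insert c [w])
              else some (d.modify c [] (fun l => l ++ [w]))
            else some d) = some (d.insert c [w]) := by simp [hcz, hcont]
        have eB : (if bl < c then (c, [w])
              else if c = bl ∧ c ≠ 0 then (bl, best ++ [w])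
              else (bl, best)) = (c, [w]) := by simp [hlt]
        simp only [eA, eB]
        apply ih (d.insert c [w]) c [w] ?_ hrest
        refine ⟨?_, ?_, ?_, ?_⟩
        · rw [hkeys]
          exact pvNodupAppendSingleton _ _ hnd hnotmem
        · intro k hk
          rw [hkeys, List.mem_append] at hk
          rcases hk with hk | hk
          · exact ⟨(hbnd k hk).1, le_of_lt (lt_of_le_of_lt (hbnd k hk).2 hlt)⟩
          · simp at hk; subst hk; exact ⟨hcpos, le_refl _⟩
        · right; refine ⟨hcpos, ?_⟩; rw [hkeys]; simp
        · rw [PySem.Dict.getD_insert_self]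
      · by_cases hcb : c = bl
        · subst hcb
          have hblpos : 0 < c := lt_of_le_of_ne hc0 (Ne.symm hcz)
          have hblmem : c ∈ d.keys := by
            rcases hmax with ⟨h0, _⟩ | ⟨_, hm⟩
            · omega
            · exact hm
          have hcont : d.contains c = true := by
            rw [PySem.Dict.contains_iff_mem_keys]; exact hblmem
          have hcont' : ¬ d.contains c = false := by simp [hcont]
          have hkeys : (d.modify c [] (fun l => l ++ [w])).keys = d.keys := by
            rw [PySem.Dict.keys_modify, PySem.Dict.keys_insert_of_contains _ _ hcont]
          have eA : (if c ≠ 0 then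
                if d.contains c = false then some (d.insert c [w])
                else some (d.modify c [] (fun l => l ++ [w]))
              else some d) = some (d.modify c [] (fun l => l ++ [w])) := by
            simp [hcz, hcont]
          rw [eA, if_neg (lt_irrefl c), if_pos (show c = c ∧ c ≠ 0 from ⟨rfl, hcz⟩)]
          apply ih (d.modify c [] (fun l => l ++ [w])) c (best ++ [w]) ?_ hrest
          refine ⟨?_, ?_, ?_, ?_⟩
          · rw [hkeys]; exact hnd
          · intro k hk; rw [hkeys] at hk; exact hbnd k hk
          · right; exact ⟨hblpos, hkeys ▸ hblmem⟩
          · rw [PySem.Dict.getD_modify_self, ← hbest]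
        · have hcpos : 0 < c := lt_of_le_of_ne hc0 (Ne.symm hcz)
          have hclt : c < bl := lt_of_le_of_ne (not_lt.mp hlt) hcb
          have hblpos : 0 < bl := lt_trans hcpos hclt
          have hblmem : bl ∈ d.keys := by
            rcases hmax with ⟨h0, _⟩ | ⟨_, hm⟩
            · omega
            · exact hm
          cases hcont : d.contains c with
          | false =>
            have hnotmem : c ∉ d.keys := by
              rw [← PySem.Dict.contains_iff_mem_keys, hcont]; simp
            have hkeys : (d.insert c [w]).keys = d.keys ++ [c] :=
              PySem.Dict.keys_insert_of_not_contains d [w] hcont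
            have eA : (if c ≠ 0 then
                  if false = false then some (d.insert c [w])
                  else some (d.modify c [] (fun l => l ++ [w]))
                else some d) = some (d.insert c [w]) := by simp [hcz]
            rw [eA, if_neg hlt, if_neg (show ¬(c = bl ∧ c ≠ 0) from fun h => hcb h.1)]
            apply ih (d.insert c [w]) bl best ?_ hrest
            refine ⟨?_, ?_, ?_, ?_⟩
            · rw [hkeys]
              exact pvNodupAppendSingleton _ _ hnd hnotmem
            · intro k hk
              rw [hkeys, List.mem_append] at hk
              rcases hk with hk | hk
              · exact hbnd k hk
              · simp at hk; subst hk; exact ⟨hcpos, le_of_lt hclt⟩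
            · right; refine ⟨hblpos, ?_⟩; rw [hkeys]; exact List.mem_append_left _ hblmem
            · rw [hbest, PySem.Dict.getD_insert_of_ne]
              exact fun h => hcb (h ▸ rfl)
          | true =>
            have hkeys : (d.modify c [] (fun l => l ++ [w])).keys = d.keys := by
              rw [PySem.Dict.keys_modify, PySem.Dict.keys_insert_of_contains _ _ hcont]
            have eA : (if c ≠ 0 then
                  if true = false then some (d.insert c [w])
                  else some (d.modify c [] (fun l => l ++ [w]))
                else some d) = some (d.modify c [] (fun l => l ++ [w])) := by
              simp [hcz]
            rw [eA, if_neg hlt, if_neg (show ¬(c = bl ∧ c ≠ 0) from fun h => hcb h.1)]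
            apply ih (d.modify c [] (fun l => l ++ [w])) bl best ?_ hrest
            refine ⟨?_, ?_, ?_, ?_⟩
            · rw [hkeys]; exact hnd
            · intro k hk; rw [hkeys] at hk; exact hbnd k hk
            · right; exact ⟨hblpos, hkeys ▸ hblmem⟩
            · rw [hbest, PySem.Dict.getD_modify_of_ne]
              exact fun h => hcb (h ▸ rfl)

lemma extract_eq (d : PySem.Dict Int (List String)) (bl : Int) (best : List String)
    (hinv : pvInv d bl best) :
    (if d.items ≠ [] then
      match PySem.List.pyGet? (PySem.List.sorted d.keys (fun k => k) true) 0 with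
      | some k0 => d.get? k0
      | none => none
    else none) = (if bl ≠ 0 then some best else none) := by
  obtain ⟨hnd, hbnd, hmax, hbest⟩ := hinv
  rcases hmax with ⟨hbl, hkeys⟩ | ⟨hpos, hmem⟩
  · have hitems : d.items = [] := by
      have : d.items.map Prod.fst = [] := hkeys
      exact List.map_eq_nil_iff.mp this
    rw [if_neg (not_not_intro hitems), if_neg (not_not_intro hbl)]
  · have hkeysne : d.keys ≠ [] := fun h => by simp [h] at hmem
    have hitems : d.items ≠ [] := fun h => hkeysne (by simp [PySem.Dict.keys, h])
    rw [if_pos hitems, if_pos (ne_of_gt hpos)]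
    rcases e : PySem.List.sorted d.keys (fun k => k) true with _ | ⟨m, t⟩
    · exact absurd ((PySem.List.sorted_eq_nil_iff _ _ _).mp e) hkeysne
    · rw [PySem.List.pyGet?_zero_cons]
      have hmmem : m ∈ d.keys := by
        rw [← PySem.List.mem_sorted d.keys (fun k => k) true, e]
        exact List.mem_cons_self
      have hmbl : m = bl :=
        le_antisymm ((hbnd m hmmem).2) (PySem.List.key_head_sorted_rev_ge d.keys (fun k => k) e bl hmem)
      have hcont : d.contains bl = true := (PySem.Dict.contains_iff_mem_keys d bl).mpr hmem
      rw [PySem.Dict.contains_eq_isSome_get?] at hcont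
      rcases hv : d.get? bl with _ | v
      · rw [hv] at hcont; simp at hcont
      · rw [hmbl]
        show d.get? bl = some best
        rw [hv, hbest, PySem.Dict.getD_eq_get?_getD, hv]
        rfl

-- ===== VERDICT (by name: the statement is the Claim_ definition above) =====
theorem get_rhyme_spec : Claim_equal_get_rhyme := by
  intro mw _ hpre
  unfold Spec_get_rhyme
  have hall : ∀ w ∈ pvWordList, ∃ c, get_character_match mw w = some c ∧ 0 ≤ c := by
    intro w hw
    have hw' : w ∈ ["Computing", "Polluting", "Diluting", "Commuting", "Recruiting", "Drooping"] := hw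
    obtain ⟨i, hi, hne⟩ := hpre w hw'
    rw [Finset.mem_Icc] at hi
    obtain ⟨c, hcs⟩ := gcmLoop_some mw.toList w.toList 1 le_rfl ⟨i, hi.1, hi.2, hne⟩
    have hge := gcmLoop_ge mw.toList w.toList 1 c hcs
    exact ⟨c, hcs, by simpa using hge⟩
  obtain ⟨d', bl', best', hA, hB, hinv⟩ := loop_inv mw pvWordList PySem.Dict.empty 0 []
    ⟨by rw [PySem.Dict.keys_empty]; exact List.nodup_nil,
     fun k hk => absurd (PySem.Dict.keys_empty ▸ hk) (List.not_mem_nil),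
     Or.inl ⟨rfl, PySem.Dict.keys_empty⟩,
     (PySem.Dict.getD_empty _ _).symm⟩ hall
  unfold get_rhyme get_rhyme_alt
  rw [hA, hB]
  exact extract_eq d' bl' best' hinv
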